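-- pv_equiv track=rewrite | github.com/Nenavathnaresh/Python_DSA | Array/Easy/two-swaps.py | canBeSortedInTwoSwaps
-- ===== SOURCE A (Python) =====
-- def canBeSortedInTwoSwaps(arr):
--     # Create a sorted version of the array
--     sorted_arr = sorted(arr)
--
--     # Find mismatched positions
--     mismatches = []
--
--     for i in range(len(arr)):
--         if arr[i] != sorted_arr[i]:
--             mismatches.append(i)
--
--     # Check if there are exactly 4 mismatches (2 swaps needed to sort)
--     if len(mismatches) == 4:
--         # We need to verify if swapping can actually sort the array
--         # Perform the two possible swaps and check if the array becomes sorted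
--         i1, i2, i3, i4 = mismatches
--
--         # Swap i1 and i4, then i2 and i3
--         arr_after_first_swap = arr[:]
--         arr_after_first_swap[i1], arr_after_first_swap[i4] = arr_after_first_swap[i4], arr_after_first_swap[i1]
--         arr_after_first_swap[i2], arr_after_first_swap[i3] = arr_after_first_swap[i3], arr_after_first_swap[i2]
--
--         # Check if array is sorted after the two swaps
--         return arr_after_first_swap == sorted_arr
--
--     # If there are not exactly 4 mismatches, return False
--     return False
-- ===== SOURCE B (Python) =====
-- def canBeSortedInTwoSwaps(arr):
--     # Two-pointer scan against the sorted order: no mismatch list is built,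
--     # no copy is swapped.  The outer pair of mismatches must cross, the inner
--     # pair must cross, and no further mismatch may lie between the inner pair.
--     s = sorted(arr)
--     n = len(arr)
--     lo = 0
--     while lo < n and arr[lo] == s[lo]:
--         lo += 1
--     hi = n - 1
--     while hi > lo and arr[hi] == s[hi]:
--         hi -= 1
--     if lo >= hi:                      # fewer than two mismatches
--         return False
--     if arr[lo] != s[hi] or arr[hi] != s[lo]:
--         return False
--     lo2 = lo + 1
--     while lo2 < hi and arr[lo2] == s[lo2]:
--         lo2 += 1
--     hi2 = hi - 1
--     while hi2 > lo2 and arr[hi2] == s[hi2]: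
--         hi2 -= 1
--     if lo2 >= hi2:                    # two or three mismatches in total
--         return False
--     if arr[lo2] != s[hi2] or arr[hi2] != s[lo2]:
--         return False
--     # exactly four mismatches: nothing between the inner pair may differ
--     return all(arr[j] == s[j] for j in range(lo2 + 1, hi2))
-- ===== Notes on version B (the rewrite author's own statement) =====
-- stated objective: alternative
-- what changed: B replaces A's mismatch-index list plus copy-two-swaps-and-compare with a convergent two-pointer scan: it locates the outermost and then the innermost mismatch pair directly, checks that each pair crosses in the sorted order, and that nothing between the inner pair differs; no index list is materialized and no list is copied or mutated.
import Mathlib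
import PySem

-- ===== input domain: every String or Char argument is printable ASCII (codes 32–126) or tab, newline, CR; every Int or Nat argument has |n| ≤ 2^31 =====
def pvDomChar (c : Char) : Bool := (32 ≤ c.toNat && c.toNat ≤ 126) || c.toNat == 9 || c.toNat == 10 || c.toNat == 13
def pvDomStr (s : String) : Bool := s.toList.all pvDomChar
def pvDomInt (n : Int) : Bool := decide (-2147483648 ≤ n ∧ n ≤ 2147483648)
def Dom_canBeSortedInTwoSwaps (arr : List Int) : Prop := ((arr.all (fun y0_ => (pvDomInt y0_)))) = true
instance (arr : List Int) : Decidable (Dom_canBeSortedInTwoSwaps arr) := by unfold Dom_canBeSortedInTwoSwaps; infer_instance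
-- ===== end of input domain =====

-- B replaces A's mismatch-index list and copy-two-swaps-and-compare by a convergent two-pointer
-- scan (outer then inner mismatch pair, each must cross in the sorted order): objective 'alternative'.

-- ===== PORT A =====
def canBeSortedInTwoSwaps (arr : List Int) : Bool :=
  let sorted_arr := PySem.List.sorted arr (fun x => x) false
  let mismatches := (PySem.List.pyRange 0 arr.length 1).foldl
      (fun acc i =>
        if PySem.List.pyGetD arr i 0 ≠ PySem.List.pyGetD sorted_arr i 0 then acc ++ [i] else acc) []
  if mismatches.length = 4 then
    match mismatches with
    | [i1, i2, i3, i4] =>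
      -- arr_after_first_swap = arr[:]; tuple swaps read the current list, then assign
      let a1 := PySem.List.pySetD (PySem.List.pySetD arr i1 (PySem.List.pyGetD arr i4 0)) i4
                  (PySem.List.pyGetD arr i1 0)
      let a2 := PySem.List.pySetD (PySem.List.pySetD a1 i2 (PySem.List.pyGetD a1 i3 0)) i3
                  (PySem.List.pyGetD a1 i2 0)
      decide (a2 = sorted_arr)
    | _ => false       -- unreachable: the guard fixes the length at 4
  else false

-- ===== PORT B =====
-- while i < n and arr[i] == s[i]: i += 1   (indices stay in range, so pyGetD's default is never used)
def pvScanUp (arr s : List Int) (n i : Int) : Int :=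
  if h : i < n ∧ PySem.List.pyGetD arr i 0 = PySem.List.pyGetD s i 0 then
    pvScanUp arr s n (i + 1)
  else i
termination_by (n - i).toNat
decreasing_by omega

-- while i > t and arr[i] == s[i]: i -= 1
def pvScanDown (arr s : List Int) (t i : Int) : Int :=
  if h : t < i ∧ PySem.List.pyGetD arr i 0 = PySem.List.pyGetD s i 0 then
    pvScanDown arr s t (i - 1)
  else i
termination_by (i - t).toNat
decreasing_by omega

def canBeSortedInTwoSwaps_alt (arr : List Int) : Bool :=
  let s := PySem.List.sorted arr (fun x => x) false
  let n : Int := arr.length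
  let lo := pvScanUp arr s n 0
  let hi := pvScanDown arr s lo (n - 1)
  if lo ≥ hi then false                -- fewer than two mismatches
  else if PySem.List.pyGetD arr lo 0 ≠ PySem.List.pyGetD s hi 0 ∨
          PySem.List.pyGetD arr hi 0 ≠ PySem.List.pyGetD s lo 0 then false
  else
    let lo2 := pvScanUp arr s hi (lo + 1)
    let hi2 := pvScanDown arr s lo2 (hi - 1)
    if lo2 ≥ hi2 then false            -- two or three mismatches in total
    else if PySem.List.pyGetD arr lo2 0 ≠ PySem.List.pyGetD s hi2 0 ∨
            PySem.List.pyGetD arr hi2 0 ≠ PySem.List.pyGetD s lo2 0 then false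
    else (PySem.List.pyRange (lo2 + 1) hi2 1).all
           (fun j => PySem.List.pyGetD arr j 0 == PySem.List.pyGetD s j 0)

-- ===== PRECONDITION & SPEC =====
def Spec_canBeSortedInTwoSwaps (arr : List Int) (out : Bool) : Prop := out = canBeSortedInTwoSwaps_alt arr
instance (arr : List Int) (out : Bool) : Decidable (Spec_canBeSortedInTwoSwaps arr out) := by unfold Spec_canBeSortedInTwoSwaps; infer_instance

-- ===== CLAIM (what is proved, stated in full; the proofs are below) =====
def Claim_equal_canBeSortedInTwoSwaps : Prop := ∀ (arr : List Int), Dom_canBeSortedInTwoSwaps arr → Spec_canBeSortedInTwoSwaps arr (canBeSortedInTwoSwaps arr)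

-- ===== LEMMAS AND PROOFS =====

-- the mismatch-index list, over Nat indices
def pvMism (arr : List Int) : List Nat :=
  (List.range arr.length).filter
    (fun k => arr.getD k 0 ≠ (PySem.List.sorted arr (fun x => x) false).getD k 0)

-- both ports reduce to this reference function of the mismatch list
def pvRef (arr : List Int) : Bool :=
  match pvMism arr with
  | [k1, k2, k3, k4] =>
      let s := PySem.List.sorted arr (fun x => x) false
      decide (arr.getD k1 0 = s.getD k4 0) && decide (arr.getD k4 0 = s.getD k1 0) &&
      decide (arr.getD k2 0 = s.getD k3 0) && decide (arr.getD k3 0 = s.getD k2 0)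
  | _ => false

lemma mismA (arr : List Int) :
    (PySem.List.pyRange 0 arr.length 1).foldl
      (fun acc i =>
        if PySem.List.pyGetD arr i 0 ≠ PySem.List.pyGetD (PySem.List.sorted arr (fun x => x) false) i 0
        then acc ++ [i] else acc) []
    = (pvMism arr).map (fun k => (k : Int)) := by
  have hfun : (fun (acc : List Int) i =>
        if PySem.List.pyGetD arr i 0 ≠ PySem.List.pyGetD (PySem.List.sorted arr (fun x => x) false) i 0
        then acc ++ [i] else acc)
      = (fun acc i =>
        if (decide (PySem.List.pyGetD arr i 0 ≠ PySem.List.pyGetD (PySem.List.sorted arr (fun x => x) false) i 0)) = true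
        then acc ++ [id i] else acc) := by
    funext acc i; simp
  rw [hfun, PySem.List.foldl_append_if, PySem.List.pyRange_zero_nat, List.filter_map]
  simp only [List.nil_append, pvMism]
  rw [List.map_id]
  rw [List.filter_congr (q := fun k : Nat =>
      decide (arr.getD k 0 ≠ (PySem.List.sorted arr (fun x => x) false).getD k 0))
      (by intro k hk; simp [Function.comp])]
  simp only [List.map_id', List.bind_eq_flatMap, List.pure_def]
  exact List.map_eq_flatMap

lemma mism_lt (arr : List Int) : ∀ k ∈ pvMism arr, k < arr.length := by
  intro k hk
  simpa using (List.mem_filter.mp hk).1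

lemma mism_pairwise (arr : List Int) : (pvMism arr).Pairwise (· < ·) :=
  List.Pairwise.filter _ (List.pairwise_lt_range)

lemma mism_off (arr : List Int) (j : Nat) (hj : j < arr.length) (hnot : j ∉ pvMism arr) :
    arr.getD j 0 = (PySem.List.sorted arr (fun x => x) false).getD j 0 := by
  by_contra h
  exact hnot (List.mem_filter.mpr ⟨List.mem_range.mpr hj, by simpa using h⟩)

-- mismatch at an in-range Int index, in terms of pvMism
lemma mism_iff (arr : List Int) (j : Int) (h0 : 0 ≤ j) (hn : j < (arr.length : Int)) :
    (PySem.List.pyGetD arr j 0 ≠ PySem.List.pyGetD (PySem.List.sorted arr (fun x => x) false) j 0)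
    ↔ j.toNat ∈ pvMism arr := by
  obtain ⟨k, rfl⟩ : ∃ k : Nat, j = (k : Int) := ⟨j.toNat, by omega⟩
  simp only [PySem.List.pyGetD_natCast, Int.toNat_natCast, pvMism, List.mem_filter,
    List.mem_range, decide_eq_true_eq]
  constructor
  · intro h; exact ⟨by omega, h⟩
  · exact fun h => h.2

-- characterisation of the up-scan
lemma pvScanUp_spec (arr s : List Int) (n i : Int) (h : i ≤ n) :
    i ≤ pvScanUp arr s n i ∧ pvScanUp arr s n i ≤ n ∧
    (∀ j, i ≤ j → j < pvScanUp arr s n i →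
      PySem.List.pyGetD arr j 0 = PySem.List.pyGetD s j 0) ∧
    (pvScanUp arr s n i < n →
      PySem.List.pyGetD arr (pvScanUp arr s n i) 0 ≠ PySem.List.pyGetD s (pvScanUp arr s n i) 0) := by
  revert h
  fun_induction pvScanUp arr s n i
  case case1 i h ih =>
    intro _
    obtain ⟨r1, r2, r3, r4⟩ := ih (by omega)
    refine ⟨by omega, r2, ?_, r4⟩
    intro j hj1 hj2
    rcases eq_or_lt_of_le hj1 with rfl | hlt
    · exact h.2
    · exact r3 j (by omega) hj2
  case case2 i h =>
    intro hin
    exact ⟨le_refl _, hin, fun j h1 h2 => absurd h1 (by omega), fun hlt he => h ⟨hlt, he⟩⟩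

-- characterisation of the down-scan
lemma pvScanDown_spec (arr s : List Int) (t i : Int) (h : t ≤ i) :
    t ≤ pvScanDown arr s t i ∧ pvScanDown arr s t i ≤ i ∧
    (∀ j, pvScanDown arr s t i < j → j ≤ i →
      PySem.List.pyGetD arr j 0 = PySem.List.pyGetD s j 0) ∧
    (t < pvScanDown arr s t i →
      PySem.List.pyGetD arr (pvScanDown arr s t i) 0 ≠ PySem.List.pyGetD s (pvScanDown arr s t i) 0) := by
  revert h
  fun_induction pvScanDown arr s t i
  case case1 i h ih =>
    intro _
    obtain ⟨r1, r2, r3, r4⟩ := ih (by omega)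
    refine ⟨r1, by omega, ?_, r4⟩
    intro j hj1 hj2
    rcases eq_or_lt_of_le hj2 with rfl | hlt
    · exact h.2
    · exact r3 j hj1 (by omega)
  case case2 i h =>
    intro hti
    exact ⟨hti, le_refl _, fun j h1 h2 => absurd h1 (by omega), fun hlt he => h ⟨hlt, he⟩⟩

lemma pvScanDown_of_le (arr s : List Int) (t i : Int) (h : i ≤ t) :
    pvScanDown arr s t i = i := by
  rw [pvScanDown]
  simp [show ¬ t < i by omega]

-- the up-scan finds the least mismatch ≥ i below the bound
lemma pvScanUp_eq (arr : List Int) (i n : Int) (h0 : 0 ≤ i) (hn : n ≤ (arr.length : Int))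
    (k : Nat) (hk : k ∈ pvMism arr) (hik : i ≤ (k : Int)) (hkn : (k : Int) < n)
    (hmin : ∀ m ∈ pvMism arr, i ≤ (m : Int) → k ≤ m) :
    pvScanUp arr (PySem.List.sorted arr (fun x => x) false) n i = (k : Int) := by
  obtain ⟨r1, r2, r3, r4⟩ := pvScanUp_spec arr (PySem.List.sorted arr (fun x => x) false) n i (by omega)
  set r := pvScanUp arr (PySem.List.sorted arr (fun x => x) false) n i with hr
  have hkm : (k:Int) < (arr.length : Int) := by omega
  have hrk : r ≤ (k : Int) := by
    by_contra hc
    exact ((mism_iff arr (k:Int) (by omega) hkm).mpr (by simpa using hk))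
      (r3 (k:Int) hik (by omega))
  have hmr : r.toNat ∈ pvMism arr := by
    rw [← mism_iff arr r (by omega) (by omega)]
    exact r4 (by omega)
  have := hmin r.toNat hmr (by omega)
  omega

-- no mismatch in [i, n): the up-scan runs to the bound
lemma pvScanUp_none (arr : List Int) (i n : Int) (h0 : 0 ≤ i) (hi : i ≤ n)
    (hn : n ≤ (arr.length : Int))
    (hnone : ∀ m ∈ pvMism arr, ¬ (i ≤ (m : Int) ∧ (m : Int) < n)) :
    pvScanUp arr (PySem.List.sorted arr (fun x => x) false) n i = n := by
  obtain ⟨r1, r2, r3, r4⟩ := pvScanUp_spec arr (PySem.List.sorted arr (fun x => x) false) n i hi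
  set r := pvScanUp arr (PySem.List.sorted arr (fun x => x) false) n i with hr
  by_contra hc
  have hrn : r < n := by omega
  have hmr : r.toNat ∈ pvMism arr := by
    rw [← mism_iff arr r (by omega) (by omega)]
    exact r4 hrn
  exact hnone r.toNat hmr ⟨by omega, by omega⟩

-- the down-scan finds the greatest mismatch ≤ i above the bound
lemma pvScanDown_eq (arr : List Int) (t i : Int) (h0 : 0 ≤ t) (hi : i < (arr.length : Int))
    (k : Nat) (hk : k ∈ pvMism arr) (htk : t < (k : Int)) (hki : (k : Int) ≤ i)
    (hmax : ∀ m ∈ pvMism arr, (m : Int) ≤ i → t < (m : Int) → m ≤ k) :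
    pvScanDown arr (PySem.List.sorted arr (fun x => x) false) t i = (k : Int) := by
  obtain ⟨r1, r2, r3, r4⟩ := pvScanDown_spec arr (PySem.List.sorted arr (fun x => x) false) t i (by omega)
  set r := pvScanDown arr (PySem.List.sorted arr (fun x => x) false) t i with hr
  have hrk : (k : Int) ≤ r := by
    by_contra hc
    exact ((mism_iff arr (k:Int) (by omega) (by omega)).mpr (by simpa using hk))
      (r3 (k:Int) (by omega) hki)
  have hmr : r.toNat ∈ pvMism arr := by
    rw [← mism_iff arr r (by omega) (by omega)]
    exact r4 (by omega)
  have := hmax r.toNat hmr (by omega) (by omega)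
  omega

-- no mismatch in (t, i]: the down-scan runs to the bound
lemma pvScanDown_none (arr : List Int) (t i : Int) (h0 : 0 ≤ t) (ht : t ≤ i)
    (hi : i < (arr.length : Int))
    (hnone : ∀ m ∈ pvMism arr, ¬ (t < (m : Int) ∧ (m : Int) ≤ i)) :
    pvScanDown arr (PySem.List.sorted arr (fun x => x) false) t i = t := by
  obtain ⟨r1, r2, r3, r4⟩ := pvScanDown_spec arr (PySem.List.sorted arr (fun x => x) false) t i ht
  set r := pvScanDown arr (PySem.List.sorted arr (fun x => x) false) t i with hr
  by_contra hc
  have htr : t < r := by omega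
  have hmr : r.toNat ∈ pvMism arr := by
    rw [← mism_iff arr r (by omega) (by omega)]
    exact r4 htr
  exact hnone r.toNat hmr ⟨by omega, by omega⟩

lemma getD_set_lt (l : List Int) (i j : Nat) (v : Int) (hj : j < l.length) :
    (l.set i v).getD j 0 = if j = i then v else l.getD j 0 := by
  rw [List.getD_eq_getElem _ _ (by simpa using hj), List.getElem_set,
      List.getD_eq_getElem _ _ hj]
  rcases eq_or_ne j i with h | h
  · simp [h]
  · simp [h, Ne.symm h]

lemma swap2_getD (l : List Int) (i j : Nat) (hi : i < l.length) (hj : j < l.length) :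
    ∀ t, t < l.length →
      ((l.set i (l.getD j 0)).set j (l.getD i 0)).getD t 0
        = if t = i ∧ i ≠ j then l.getD j 0 else if t = j then l.getD i 0 else l.getD t 0 := by
  intro t ht
  rw [getD_set_lt (l.set i (l.getD j 0)) j t _ (by simpa using ht),
      getD_set_lt l i t _ ht]
  by_cases hij : i = j
  · subst hij; split_ifs <;> simp_all
  · split_ifs <;> simp_all

lemma core (arr s : List Int) (hs : s.length = arr.length)
    (k1 k2 k3 k4 : Nat) (h12 : k1 < k2) (h23 : k2 < k3) (h34 : k3 < k4) (h4 : k4 < arr.length)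
    (hoff : ∀ j, j < arr.length → j ≠ k1 → j ≠ k2 → j ≠ k3 → j ≠ k4 → arr.getD j 0 = s.getD j 0) :
    ((((arr.set k1 (arr.getD k4 0)).set k4 (arr.getD k1 0)).set k2
        (((arr.set k1 (arr.getD k4 0)).set k4 (arr.getD k1 0)).getD k3 0)).set k3
        (((arr.set k1 (arr.getD k4 0)).set k4 (arr.getD k1 0)).getD k2 0) = s)
    ↔ (arr.getD k1 0 = s.getD k4 0 ∧ arr.getD k4 0 = s.getD k1 0 ∧
       arr.getD k2 0 = s.getD k3 0 ∧ arr.getD k3 0 = s.getD k2 0) := by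
  have h1 : k1 < arr.length := by omega
  have h2 : k2 < arr.length := by omega
  have h3 : k3 < arr.length := by omega
  have H1 := swap2_getD arr k1 k4 h1 h4
  have hlen1 : ((arr.set k1 (arr.getD k4 0)).set k4 (arr.getD k1 0)).length = arr.length := by simp
  generalize hA : (arr.set k1 (arr.getD k4 0)).set k4 (arr.getD k1 0) = a1 at H1 hlen1 ⊢
  have H2 := swap2_getD a1 k2 k3 (by omega) (by omega)
  have hlen2 : ((a1.set k2 (a1.getD k3 0)).set k3 (a1.getD k2 0)).length = arr.length := by
    simp [hlen1]
  generalize hB : (a1.set k2 (a1.getD k3 0)).set k3 (a1.getD k2 0) = a2 at H2 hlen2 ⊢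
  have hfull : ∀ t, t < arr.length →
      a2.getD t 0 = if t = k1 then arr.getD k4 0 else if t = k4 then arr.getD k1 0
        else if t = k2 then arr.getD k3 0 else if t = k3 then arr.getD k2 0 else arr.getD t 0 := by
    intro t ht
    rw [H2 t (by omega), H1 k3 h3, H1 k2 h2, H1 t ht]
    split_ifs <;> first | rfl | omega
  have hget : ∀ j : Nat, (hj : j < a2.length) → (hj' : j < s.length) →
      (a2[j]'hj = s[j]'hj') ↔ (a2.getD j 0 = s.getD j 0) := by
    intro j hj hj'
    rw [List.getD_eq_getElem _ _ hj, List.getD_eq_getElem _ _ hj']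
  constructor
  · intro he
    have hp : ∀ j : Nat, a2.getD j 0 = s.getD j 0 := by intro j; rw [he]
    refine ⟨?_, ?_, ?_, ?_⟩
    · have := hp k4; rw [hfull k4 h4] at this
      simpa only [if_neg (by omega : ¬ k4 = k1), if_pos rfl] using this
    · have := hp k1; rw [hfull k1 h1] at this
      simpa only [if_pos rfl] using this
    · have := hp k3; rw [hfull k3 h3] at this
      simpa only [if_neg (by omega : ¬ k3 = k1), if_neg (by omega : ¬ k3 = k4),
        if_neg (by omega : ¬ k3 = k2), if_pos rfl] using this
    · have := hp k2; rw [hfull k2 h2] at this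
      simpa only [if_neg (by omega : ¬ k2 = k1), if_neg (by omega : ¬ k2 = k4), if_pos rfl] using this
  · rintro ⟨e1, e2, e3, e4⟩
    apply List.ext_getElem (by omega)
    intro j hj hj'
    rw [hget j hj hj', hfull j (by omega)]
    split_ifs with c1 c2 c3 c4
    · subst c1; exact e2
    · subst c2; exact e1
    · subst c3; exact e4
    · subst c4; exact e3
    · exact hoff j (by omega) c1 c3 c4 c2

lemma portA_eq_ref (arr : List Int) : canBeSortedInTwoSwaps arr = pvRef arr := by
  simp only [canBeSortedInTwoSwaps, pvRef, mismA]
  rcases hM : pvMism arr with _ | ⟨n1, _ | ⟨n2, _ | ⟨n3, _ | ⟨n4, _ | ⟨n5, rest⟩⟩⟩⟩⟩ <;>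
    simp only [List.flatMap_cons, List.flatMap_nil, List.bind_eq_flatMap, List.pure_def,
      List.map_cons, List.map_nil, List.cons_append, List.nil_append,
      List.length_cons, List.length_nil, List.map_id'] <;> try (simp; done)
  simp only [if_true, PySem.List.pySetD_natCast, PySem.List.pyGetD_natCast]
  have hs : (PySem.List.sorted arr (fun x => x) false).length = arr.length :=
    PySem.List.length_sorted ..
  have hp := mism_pairwise arr
  rw [hM] at hp
  simp only [List.pairwise_cons, List.mem_cons, List.not_mem_nil] at hp
  have h4 : n4 < arr.length := mism_lt arr n4 (by rw [hM]; simp)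
  have hoff : ∀ j, j < arr.length → j ≠ n1 → j ≠ n2 → j ≠ n3 → j ≠ n4 →
      arr.getD j 0 = (PySem.List.sorted arr (fun x => x) false).getD j 0 := by
    intro j hj c1 c2 c3 c4
    exact mism_off arr j hj (by rw [hM]; simp [c1, c2, c3, c4])
  rw [decide_eq_decide.mpr
    (core arr (PySem.List.sorted arr (fun x => x) false) hs n1 n2 n3 n4
      (by tauto) (by tauto) (by tauto) h4 hoff)]
  simp [Bool.and_assoc]
  infer_instance

lemma portB_eq_ref (arr : List Int) : canBeSortedInTwoSwaps_alt arr = pvRef arr := by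
  have hlt := mism_lt arr
  have hp := mism_pairwise arr
  simp only [canBeSortedInTwoSwaps_alt, pvRef]
  rcases hM : pvMism arr with _ | ⟨k1, _ | ⟨k2, _ | ⟨k3, _ | ⟨k4, _ | ⟨k5, rest⟩⟩⟩⟩⟩
  · -- no mismatch
    have hlo := pvScanUp_none arr 0 (arr.length : Int) (by omega) (by omega) (by omega)
      (by intro m hm; rw [hM] at hm; simp at hm)
    rw [hlo, pvScanDown_of_le arr _ _ _ (by omega), if_pos (by omega)]
  · -- one mismatch
    have hm1 : k1 ∈ pvMism arr := by rw [hM]; simp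
    have h1 : k1 < arr.length := hlt k1 hm1
    have hlo := pvScanUp_eq arr 0 (arr.length : Int) (by omega) (by omega) k1 hm1
      (by omega) (by omega) (by intro m hm _; rw [hM] at hm; simp at hm; omega)
    have hhi := pvScanDown_none arr (k1 : Int) ((arr.length : Int) - 1) (by omega) (by omega)
      (by omega) (by intro m hm; rw [hM] at hm; simp at hm; omega)
    rw [hlo, hhi, if_pos (by omega)]
  · -- two mismatches
    rw [hM] at hp; simp only [List.pairwise_cons, List.mem_cons,
      List.not_mem_nil, or_false] at hp
    have hm1 : k1 ∈ pvMism arr := by rw [hM]; simp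
    have hm2 : k2 ∈ pvMism arr := by rw [hM]; simp
    have h2 : k2 < arr.length := hlt k2 hm2
    have h12 : k1 < k2 := by
      have := hp.1 k1; have := hp.1 k2; tauto
    have hlo := pvScanUp_eq arr 0 (arr.length : Int) (by omega) (by omega) k1 hm1
      (by omega) (by omega) (by intro m hm _; rw [hM] at hm; simp at hm; rcases hm with rfl | rfl <;> omega)
    have hhi := pvScanDown_eq arr (k1 : Int) ((arr.length : Int) - 1) (by omega) (by omega)
      k2 hm2 (by omega) (by omega)
      (by intro m hm _ _; rw [hM] at hm; simp at hm; rcases hm with rfl | rfl <;> omega)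
    rw [hlo, hhi, if_neg (by omega)]
    by_cases hc : PySem.List.pyGetD arr (k1 : Int) 0 ≠
          PySem.List.pyGetD (PySem.List.sorted arr (fun x => x) false) (k2 : Int) 0 ∨
        PySem.List.pyGetD arr (k2 : Int) 0 ≠
          PySem.List.pyGetD (PySem.List.sorted arr (fun x => x) false) (k1 : Int) 0
    · rw [if_pos hc]
    · rw [if_neg hc]
      have hlo2 := pvScanUp_none arr ((k1 : Int) + 1) (k2 : Int) (by omega) (by omega) (by omega)
        (by intro m hm; rw [hM] at hm; simp at hm; rcases hm with rfl | rfl <;> omega)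
      rw [hlo2, pvScanDown_of_le arr _ _ _ (by omega), if_pos (by omega)]
  · -- three mismatches
    rw [hM] at hp; simp only [List.pairwise_cons, List.mem_cons,
      List.not_mem_nil, or_false] at hp
    have hm1 : k1 ∈ pvMism arr := by rw [hM]; simp
    have hm2 : k2 ∈ pvMism arr := by rw [hM]; simp
    have hm3 : k3 ∈ pvMism arr := by rw [hM]; simp
    have h3 : k3 < arr.length := hlt k3 hm3
    have h12 : k1 < k2 := by have := hp.1 k2; tauto
    have h23 : k2 < k3 := by have := hp.2.1 k3; tauto
    have h13 : k1 < k3 := by have := hp.1 k3; tauto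
    have hlo := pvScanUp_eq arr 0 (arr.length : Int) (by omega) (by omega) k1 hm1
      (by omega) (by omega)
      (by intro m hm _; rw [hM] at hm; simp at hm; rcases hm with rfl | rfl | rfl <;> omega)
    have hhi := pvScanDown_eq arr (k1 : Int) ((arr.length : Int) - 1) (by omega) (by omega)
      k3 hm3 (by omega) (by omega)
      (by intro m hm _ _; rw [hM] at hm; simp at hm; rcases hm with rfl | rfl | rfl <;> omega)
    rw [hlo, hhi, if_neg (by omega)]
    by_cases hc : PySem.List.pyGetD arr (k1 : Int) 0 ≠
          PySem.List.pyGetD (PySem.List.sorted arr (fun x => x) false) (k3 : Int) 0 ∨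
        PySem.List.pyGetD arr (k3 : Int) 0 ≠
          PySem.List.pyGetD (PySem.List.sorted arr (fun x => x) false) (k1 : Int) 0
    · rw [if_pos hc]
    · rw [if_neg hc]
      have hlo2 := pvScanUp_eq arr ((k1 : Int) + 1) (k3 : Int) (by omega) (by omega) k2 hm2
        (by omega) (by omega)
        (by intro m hm hm'; rw [hM] at hm; simp at hm; rcases hm with rfl | rfl | rfl <;> omega)
      have hhi2 := pvScanDown_none arr (k2 : Int) ((k3 : Int) - 1) (by omega) (by omega) (by omega)
        (by intro m hm; rw [hM] at hm; simp at hm; rcases hm with rfl | rfl | rfl <;> omega)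
      rw [hlo2, hhi2, if_pos (by omega)]
  · -- four mismatches
    rw [hM] at hp; simp only [List.pairwise_cons, List.mem_cons,
      List.not_mem_nil, or_false] at hp
    have hm1 : k1 ∈ pvMism arr := by rw [hM]; simp
    have hm2 : k2 ∈ pvMism arr := by rw [hM]; simp
    have hm3 : k3 ∈ pvMism arr := by rw [hM]; simp
    have hm4 : k4 ∈ pvMism arr := by rw [hM]; simp
    have h4 : k4 < arr.length := hlt k4 hm4
    have h12 : k1 < k2 := by have := hp.1 k2; tauto
    have h23 : k2 < k3 := by have := hp.2.1 k3; tauto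
    have h34 : k3 < k4 := by have := hp.2.2.1 k4; tauto
    have h13 : k1 < k3 := by have := hp.1 k3; tauto
    have h14 : k1 < k4 := by have := hp.1 k4; tauto
    have h24 : k2 < k4 := by have := hp.2.1 k4; tauto
    have hlo := pvScanUp_eq arr 0 (arr.length : Int) (by omega) (by omega) k1 hm1
      (by omega) (by omega)
      (by intro m hm _; rw [hM] at hm; simp at hm; rcases hm with rfl | rfl | rfl | rfl <;> omega)
    have hhi := pvScanDown_eq arr (k1 : Int) ((arr.length : Int) - 1) (by omega) (by omega)
      k4 hm4 (by omega) (by omega)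
      (by intro m hm _ _; rw [hM] at hm; simp at hm; rcases hm with rfl | rfl | rfl | rfl <;> omega)
    rw [hlo, hhi, if_neg (by omega)]
    by_cases hc1 : PySem.List.pyGetD arr (k1 : Int) 0 ≠
          PySem.List.pyGetD (PySem.List.sorted arr (fun x => x) false) (k4 : Int) 0 ∨
        PySem.List.pyGetD arr (k4 : Int) 0 ≠
          PySem.List.pyGetD (PySem.List.sorted arr (fun x => x) false) (k1 : Int) 0
    · rw [if_pos hc1]
      simp only [PySem.List.pyGetD_natCast] at hc1
      rcases hc1 with h | h <;> simp [List.getD_eq_getElem?_getD] at h <;> simp [h]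
    · rw [if_neg hc1]
      have hlo2 := pvScanUp_eq arr ((k1 : Int) + 1) (k4 : Int) (by omega) (by omega) k2 hm2
        (by omega) (by omega)
        (by intro m hm hm'; rw [hM] at hm; simp at hm; rcases hm with rfl | rfl | rfl | rfl <;> omega)
      have hhi2 := pvScanDown_eq arr (k2 : Int) ((k4 : Int) - 1) (by omega) (by omega)
        k3 hm3 (by omega) (by omega)
        (by intro m hm _ _; rw [hM] at hm; simp at hm; rcases hm with rfl | rfl | rfl | rfl <;> omega)
      rw [hlo2, hhi2, if_neg (by omega)]
      by_cases hc2 : PySem.List.pyGetD arr (k2 : Int) 0 ≠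
            PySem.List.pyGetD (PySem.List.sorted arr (fun x => x) false) (k3 : Int) 0 ∨
          PySem.List.pyGetD arr (k3 : Int) 0 ≠
            PySem.List.pyGetD (PySem.List.sorted arr (fun x => x) false) (k2 : Int) 0
      · rw [if_pos hc2]
        simp only [PySem.List.pyGetD_natCast] at hc2
        rcases hc2 with h | h <;> simp [List.getD_eq_getElem?_getD] at h <;> simp [h]
      · rw [if_neg hc2]
        push_neg at hc1 hc2
        simp only [PySem.List.pyGetD_natCast] at hc1 hc2
        rw [List.all_eq_true.mpr ?_]
        · simp [List.getD_eq_getElem?_getD] at hc1 hc2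
          simp [hc1.1, hc1.2, hc2.1, hc2.2]
        · intro j hj
          rw [PySem.List.mem_pyRange_one] at hj
          simp only [beq_iff_eq]
          by_contra hne
          have hmem := (mism_iff arr j (by omega) (by omega)).mp hne
          rw [hM] at hmem
          simp at hmem
          omega
  · -- five or more mismatches
    rw [hM] at hp
    simp only [List.pairwise_cons] at hp
    have hm1 : k1 ∈ pvMism arr := by rw [hM]; simp
    have hm2 : k2 ∈ pvMism arr := by rw [hM]; simp
    have hm3 : k3 ∈ pvMism arr := by rw [hM]; simp
    have hm4 : k4 ∈ pvMism arr := by rw [hM]; simp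
    have hm5 : k5 ∈ pvMism arr := by rw [hM]; simp
    have h5 : k5 < arr.length := hlt k5 hm5
    have h12 : k1 < k2 := hp.1 k2 (by simp)
    have h23 : k2 < k3 := hp.2.1 k3 (by simp)
    have h34 : k3 < k4 := hp.2.2.1 k4 (by simp)
    have h45 : k4 < k5 := hp.2.2.2.1 k5 (by simp)
    have hordk1 : ∀ m ∈ pvMism arr, m ≠ k1 → k1 < m := by
      intro m hm hne
      rw [hM] at hm
      rcases List.mem_cons.mp hm with h | h
      · omega
      · exact hp.1 m h
    have hordk2 : ∀ m ∈ pvMism arr, m ≠ k1 → m ≠ k2 → k2 < m := by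
      intro m hm hne1 hne2
      rw [hM] at hm
      rcases List.mem_cons.mp hm with h | h
      · omega
      · rcases List.mem_cons.mp h with h' | h'
        · omega
        · exact hp.2.1 m h'
    have hlo := pvScanUp_eq arr 0 (arr.length : Int) (by omega) (by omega) k1 hm1
      (by omega) (by omega)
      (by intro m hm _
          rcases eq_or_ne m k1 with rfl | hne
          · omega
          · have := hordk1 m hm hne; omega)
    rw [hlo]
    obtain ⟨d1, d2, d3, d4⟩ := pvScanDown_spec arr (PySem.List.sorted arr (fun x => x) false)
      (k1 : Int) ((arr.length : Int) - 1) (by omega)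
    set hi := pvScanDown arr (PySem.List.sorted arr (fun x => x) false)
      (k1 : Int) ((arr.length : Int) - 1) with hhidef
    have hhi5 : (k5 : Int) ≤ hi := by
      by_contra hcon
      exact ((mism_iff arr (k5 : Int) (by omega) (by omega)).mpr (by simpa using hm5))
        (d3 (k5 : Int) (by omega) (by omega))
    rw [if_neg (by omega)]
    by_cases hc1 : PySem.List.pyGetD arr (k1 : Int) 0 ≠
          PySem.List.pyGetD (PySem.List.sorted arr (fun x => x) false) hi 0 ∨
        PySem.List.pyGetD arr hi 0 ≠
          PySem.List.pyGetD (PySem.List.sorted arr (fun x => x) false) (k1 : Int) 0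
    · rw [if_pos hc1]
    · rw [if_neg hc1]
      have hlo2 := pvScanUp_eq arr ((k1 : Int) + 1) hi (by omega) (by omega) k2 hm2
        (by omega) (by omega)
        (by intro m hm hm'
            rcases eq_or_ne m k1 with rfl | hne1
            · omega
            · rcases eq_or_ne m k2 with rfl | hne2
              · omega
              · have := hordk2 m hm hne1 hne2; omega)
      rw [hlo2]
      obtain ⟨e1, e2, e3, e4⟩ := pvScanDown_spec arr (PySem.List.sorted arr (fun x => x) false)
        (k2 : Int) (hi - 1) (by omega)
      set hi2 := pvScanDown arr (PySem.List.sorted arr (fun x => x) false) (k2 : Int) (hi - 1)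
        with hhi2def
      have hhi24 : (k4 : Int) ≤ hi2 := by
        by_contra hcon
        exact ((mism_iff arr (k4 : Int) (by omega) (by omega)).mpr (by simpa using hm4))
          (e3 (k4 : Int) (by omega) (by omega))
      rw [if_neg (by omega)]
      by_cases hc2 : PySem.List.pyGetD arr ((k2 : Nat) : Int) 0 ≠
            PySem.List.pyGetD (PySem.List.sorted arr (fun x => x) false) hi2 0 ∨
          PySem.List.pyGetD arr hi2 0 ≠
            PySem.List.pyGetD (PySem.List.sorted arr (fun x => x) false) ((k2 : Nat) : Int) 0
      · rw [if_pos hc2]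
      · rw [if_neg hc2]
        rw [List.all_eq_false.mpr ?_]
        refine ⟨(k3 : Int), PySem.List.mem_pyRange_one.mpr ⟨by omega, by omega⟩, ?_⟩
        simp only [beq_iff_eq]
        exact (mism_iff arr (k3 : Int) (by omega) (by omega)).mpr (by simpa using hm3)

-- ===== VERDICT (by name: the statement is the Claim_ definition above) =====
theorem canBeSortedInTwoSwaps_spec : Claim_equal_canBeSortedInTwoSwaps := by
  intro arr _
  show canBeSortedInTwoSwaps arr = canBeSortedInTwoSwaps_alt arr
  rw [portA_eq_ref, portB_eq_ref]
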